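-- pv_equiv track=rewrite | github.com/SuperInstance/flux-stdlib | stdlib.py | _strupper_fn
-- ===== SOURCE A (Python) =====
-- def _strupper_fn(regs, mem):
--     """strupper: R0=ptr, R1=length -> uppercase in place. R2=changes."""
--     ptr = regs.get(0, 0) & 0xFFFF
--     length = regs.get(1, 0)
--     changes = 0
--     for i in range(length):
--         if ptr + i < len(mem) and 0x61 <= mem[ptr + i] <= 0x7A:
--             mem[ptr + i] -= 32
--             changes += 1
--     regs_out = dict(regs)
--     regs_out[2] = changes
--     return regs_out, mem
-- ===== SOURCE B (Python) =====
-- def _strupper_fn(regs, mem):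
--     """strupper: R0=ptr, R1=length -> uppercase in place. R2=changes.
--     Extract/transform/write-back decomposition: slice the in-bounds region,
--     build an uppercased copy, write it back with one slice assignment."""
--     ptr = regs.get(0, 0) & 0xFFFF
--     length = regs.get(1, 0)
--     region = mem[ptr:ptr + max(length, 0)]
--     new_region = [b - 32 if 0x61 <= b <= 0x7A else b for b in region]
--     changes = sum(1 for b in region if 0x61 <= b <= 0x7A)
--     mem[ptr:ptr + len(region)] = new_region
--     regs_out = dict(regs)
--     regs_out[2] = changes
--     return regs_out, mem
-- ===== Notes on version B (the rewrite author's own statement) =====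
-- stated objective: alternative
-- what changed: Replaced A's index-by-index mutate-and-count loop over range(length) with an extract/transform/write-back decomposition: slice out the in-bounds region, map it to its uppercased copy, count the lowercase bytes, and splice the copy back with one slice assignment.
import Mathlib
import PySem

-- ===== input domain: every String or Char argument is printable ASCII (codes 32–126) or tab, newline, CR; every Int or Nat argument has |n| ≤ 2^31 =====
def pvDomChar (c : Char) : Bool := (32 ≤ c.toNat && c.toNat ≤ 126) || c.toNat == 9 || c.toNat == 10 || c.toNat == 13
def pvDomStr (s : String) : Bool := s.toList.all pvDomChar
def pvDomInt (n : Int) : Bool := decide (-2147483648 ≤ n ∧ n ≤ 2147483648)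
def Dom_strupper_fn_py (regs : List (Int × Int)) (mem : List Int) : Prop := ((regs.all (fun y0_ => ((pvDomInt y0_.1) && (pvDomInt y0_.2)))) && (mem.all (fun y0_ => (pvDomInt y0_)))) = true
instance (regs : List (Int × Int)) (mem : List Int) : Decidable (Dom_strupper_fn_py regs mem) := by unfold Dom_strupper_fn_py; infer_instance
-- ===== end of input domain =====

-- B replaces A's index-by-index mutate-and-count loop by an extract/transform/write-back
-- decomposition (slice out the region, map it, count, splice it back); equivalence is about
-- the RETURN value — in Python both A and B mutate `mem` in place identically.

-- ===== PORT A =====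
def strupper_fn_py (regs : List (Int × Int)) (mem : List Int) : (List (Int × Int)) × List Int :=
  let d := PySem.Dict.ofList regs
  let ptr : Int := PySem.Int.band (d.getD 0 0) 0xFFFF
  let length : Int := d.getD 1 0
  let st := (PySem.List.pyRange 0 length 1).foldl
    (fun (s : List Int × Int) (i : Int) =>
      if ptr + i < (s.1.length : Int) ∧
         0x61 ≤ PySem.List.pyGetD s.1 (ptr + i) 0 ∧ PySem.List.pyGetD s.1 (ptr + i) 0 ≤ 0x7A
      then (PySem.List.pySetD s.1 (ptr + i) (PySem.List.pyGetD s.1 (ptr + i) 0 - 32), s.2 + 1)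
      else s)
    (mem, (0 : Int))
  ((d.insert 2 st.2).items, st.1)

-- ===== PORT B =====
def strupper_fn_py_alt (regs : List (Int × Int)) (mem : List Int) : (List (Int × Int)) × List Int :=
  let d := PySem.Dict.ofList regs
  let ptr : Int := PySem.Int.band (d.getD 0 0) 0xFFFF
  let length : Int := d.getD 1 0
  let region := PySem.List.slice mem (some ptr) (some (ptr + max length 0))
  let newRegion := region.map (fun b => if 0x61 ≤ b ∧ b ≤ 0x7A then b - 32 else b)
  let changes : Int := (region.countP (fun b => decide (0x61 ≤ b ∧ b ≤ 0x7A)) : Int)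
  -- slice assignment mem[ptr:ptr+len(region)] = new_region (equal lengths): splice in place
  let memOut := mem.take ptr.toNat ++ newRegion ++ mem.drop (ptr.toNat + region.length)
  ((d.insert 2 changes).items, memOut)

-- ===== PRECONDITION & SPEC =====
def Spec_strupper_fn_py (regs : List (Int × Int)) (mem : List Int) (out : (List (Int × Int)) × List Int) : Prop := out = strupper_fn_py_alt regs mem
instance (regs : List (Int × Int)) (mem : List Int) (out : (List (Int × Int)) × List Int) : Decidable (Spec_strupper_fn_py regs mem out) := by unfold Spec_strupper_fn_py; infer_instance

-- ===== CLAIM (what is proved, stated in full; the proofs are below) =====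
def Claim_equal_strupper_fn_py : Prop := ∀ (regs : List (Int × Int)) (mem : List Int), Dom_strupper_fn_py regs mem → Spec_strupper_fn_py regs mem (strupper_fn_py regs mem)

-- ===== LEMMAS AND PROOFS =====

-- Nat-indexed form of A's loop body (proof helper only)
def pvStep (s : List Int × Int) (j : Nat) : List Int × Int :=
  if j < s.1.length ∧ 0x61 ≤ s.1.getD j 0 ∧ s.1.getD j 0 ≤ 0x7A
  then (s.1.set j (s.1.getD j 0 - 32), s.2 + 1)
  else s

theorem pvBody (p k : Nat) (s : List Int × Int) :
    (if (p : Int) + (0 + (k : Int)) < (s.1.length : Int) ∧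
        0x61 ≤ PySem.List.pyGetD s.1 ((p : Int) + (0 + (k : Int))) 0 ∧
        PySem.List.pyGetD s.1 ((p : Int) + (0 + (k : Int))) 0 ≤ 0x7A
     then (PySem.List.pySetD s.1 ((p : Int) + (0 + (k : Int)))
             (PySem.List.pyGetD s.1 ((p : Int) + (0 + (k : Int))) 0 - 32), s.2 + 1)
     else s)
    = pvStep s (p + k) := by
  have h : (p : Int) + (0 + (k : Int)) = ((p + k : Nat) : Int) := by push_cast; ring
  rw [h]
  simp only [pvStep, PySem.List.pyGetD_natCast, PySem.List.pySetD_natCast, Nat.cast_lt]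

theorem pvNoop (L : Nat) : ∀ (p : Nat) (ms : List Int) (c : Int), ms.length ≤ p →
    (List.range L).foldl (fun s k => pvStep s (p + k)) (ms, c) = (ms, c) := by
  induction L with
  | zero => intro p ms c _; rfl
  | succ L ih =>
    intro p ms c hle
    rw [List.range_succ_eq_map, List.foldl_cons, List.foldl_map]
    have h0 : pvStep (ms, c) (p + 0) = (ms, c) := by
      simp only [pvStep]
      rw [if_neg]; rintro ⟨h1, -⟩; simp at h1; omega
    rw [h0]
    have hfun : (fun (s : List Int × Int) (k : Nat) => pvStep s (p + Nat.succ k))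
        = fun s k => pvStep s ((p + 1) + k) := by
      funext s k; congr 1; omega
    rw [hfun]
    exact ih (p + 1) ms c (by omega)

theorem pvCore (L : Nat) : ∀ (pre t : List Int) (c : Int),
    (List.range L).foldl (fun s k => pvStep s (pre.length + k)) (pre ++ t, c)
    = (pre ++ (t.take L).map (fun b => if 0x61 ≤ b ∧ b ≤ 0x7A then b - 32 else b) ++ t.drop L,
       c + ((t.take L).countP (fun b => decide (0x61 ≤ b ∧ b ≤ 0x7A)) : Int)) := by
  induction L with
  | zero => intro pre t c; simp
  | succ L ih =>
    intro pre t c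
    rw [List.range_succ_eq_map, List.foldl_cons, List.foldl_map]
    cases t with
    | nil =>
      have h0 : pvStep (pre ++ [], c) (pre.length + 0) = (pre ++ [], c) := by
        simp only [pvStep]
        rw [if_neg]; rintro ⟨h1, -⟩; simp at h1
      rw [h0]
      have hfun : (fun (s : List Int × Int) (k : Nat) => pvStep s (pre.length + Nat.succ k))
          = fun s k => pvStep s ((pre.length + 1) + k) := by
        funext s k; congr 1; omega
      rw [hfun, pvNoop L (pre.length + 1) (pre ++ []) c (by simp)]
      simp
    | cons b t' =>
      have hget : (pre ++ b :: t').getD pre.length 0 = b := by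
        rw [List.getD_append_right pre (b :: t') 0 pre.length le_rfl]
        simp
      have hlt : pre.length + 0 < (pre ++ b :: t').length := by simp
      have hset : ∀ v : Int, (pre ++ b :: t').set pre.length v = (pre ++ [v]) ++ t' := by
        intro v
        rw [List.set_append_right pre.length v le_rfl]
        simp
      have hfun : (fun (s : List Int × Int) (k : Nat) => pvStep s (pre.length + Nat.succ k))
          = fun s k => pvStep s ((pre.length + 1) + k) := by
        funext s k; congr 1; omega
      by_cases hb : 0x61 ≤ b ∧ b ≤ 0x7A
      · have h0 : pvStep (pre ++ b :: t', c) (pre.length + 0)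
            = ((pre ++ [b - 32]) ++ t', c + 1) := by
          simp only [pvStep, Nat.add_zero, hget]
          rw [if_pos ⟨by simpa using hlt, hb⟩, hset]
        rw [h0, hfun]
        have := ih (pre ++ [b - 32]) t' (c + 1)
        simp only [List.length_append, List.length_singleton] at this
        rw [this]
        simp only [List.take_succ_cons, List.drop_succ_cons, List.map_cons, List.countP_cons]
        simp [hb]
        push_cast
        ring
      · have h0 : pvStep (pre ++ b :: t', c) (pre.length + 0) = ((pre ++ [b]) ++ t', c) := by
          simp only [pvStep, Nat.add_zero, hget]
          rw [if_neg (by rintro ⟨-, h⟩; exact hb h)]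
          simp
        rw [h0, hfun]
        have := ih (pre ++ [b]) t' c
        simp only [List.length_append, List.length_singleton] at this
        rw [this]
        simp only [List.take_succ_cons, List.drop_succ_cons, List.map_cons, List.countP_cons]
        simp [hb]

-- ===== VERDICT (by name: the statement is the Claim_ definition above) =====
theorem strupper_fn_py_spec : Claim_equal_strupper_fn_py := by
  intro regs mem _
  unfold Spec_strupper_fn_py strupper_fn_py strupper_fn_py_alt
  simp only []
  set d := PySem.Dict.ofList regs with hd
  set ptr : Int := PySem.Int.band (d.getD 0 0) 0xFFFF with hptr
  set length : Int := d.getD 1 0 with hlen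
  have hptr0 : 0 ≤ ptr := by
    rw [hptr, PySem.Int.band_comm]
    exact PySem.Int.band_nonneg_of_nonneg_left _ (by norm_num)
  obtain ⟨p, hptrp⟩ : ∃ p : Nat, ptr = (p : Int) := ⟨ptr.toNat, by omega⟩
  rw [hptrp]
  by_cases hL : length ≤ 0
  · -- empty range, empty region
    have hr : PySem.List.pyRange 0 length 1 = [] := by
      rw [PySem.List.pyRange_one]
      have h0 : (length - 0).toNat = 0 := by omega
      rw [h0]; rfl
    have hmax : max length 0 = 0 := max_eq_right hL
    have hsl : PySem.List.slice mem (some ((p : Int))) (some ((p : Int) + max length 0))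
        = ([] : List Int) := by
      rw [hmax, add_zero, PySem.List.slice_toNat mem (by positivity) (by positivity)]
      simp
    rw [hr, hsl]
    simp [List.take_append_drop]
  · push_neg at hL
    obtain ⟨L, hLc⟩ : ∃ L : Nat, length = (L : Int) := ⟨length.toNat, by omega⟩
    have hmax : max length 0 = length := max_eq_left (le_of_lt hL)
    have hsl : PySem.List.slice mem (some ((p : Int))) (some ((p : Int) + max length 0))
        = (mem.drop p).take L := by
      rw [hmax, hLc, PySem.List.slice_toNat mem (by positivity) (by positivity)]
      congr 1 <;> omega
    have hrange : PySem.List.pyRange 0 length 1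
        = (List.range L).map (fun k : Nat => (0 : Int) + (k : Int)) := by
      rw [PySem.List.pyRange_one, hLc]
      have h1 : ((L : Int) - 0).toNat = L := by omega
      rw [h1]
    rw [hrange, hsl, List.foldl_map]
    have hbody : (fun (s : List Int × Int) (k : Nat) =>
        if (p : Int) + (0 + (k : Int)) < (s.1.length : Int) ∧
           0x61 ≤ PySem.List.pyGetD s.1 ((p : Int) + (0 + (k : Int))) 0 ∧
           PySem.List.pyGetD s.1 ((p : Int) + (0 + (k : Int))) 0 ≤ 0x7A
        then (PySem.List.pySetD s.1 ((p : Int) + (0 + (k : Int)))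
                (PySem.List.pyGetD s.1 ((p : Int) + (0 + (k : Int))) 0 - 32), s.2 + 1)
        else s) = fun s k => pvStep s (p + k) := by
      funext s k; exact pvBody p k s
    rw [hbody]
    by_cases hpm : mem.length ≤ p
    · -- region starts past the end: loop is a no-op, region is empty
      have hdrop : mem.drop p = [] := List.drop_eq_nil_of_le hpm
      rw [pvNoop L p mem 0 hpm, hdrop]
      simp [List.take_append_drop]
    · push_neg at hpm
      have hpre : (mem.take p).length = p := by
        rw [List.length_take]; omega
      have hsplit : mem = mem.take p ++ mem.drop p := (List.take_append_drop p mem).symm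
      have key := pvCore L (mem.take p) (mem.drop p) 0
      rw [hpre] at key
      conv_lhs => rw [hsplit]
      rw [key]
      have hdd : mem.drop (p + ((mem.drop p).take L).length) = (mem.drop p).drop L := by
        rw [List.drop_drop, List.length_take, List.length_drop]
        rcases le_or_gt L (mem.length - p) with h | h
        · rw [min_eq_left h]
        · rw [min_eq_right (by omega)]
          rw [List.drop_eq_nil_of_le (by omega)]
          exact (List.drop_eq_nil_of_le (by omega)).symm
      simp only [Int.toNat_natCast]
      rw [hdd]
      simp
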